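-- pv_equiv track=rewrite | github.com/GenryEden/kpolyakovName | 452.py | f
-- ===== SOURCE A (Python) =====
-- def f(x):
-- 	if x < 3:
-- 		return 0
-- 	elif x == 3:
-- 		return 1
-- 	elif x == 18:
-- 		return 0
-- 	else:
-- 		ans = f(x-1)
-- 		if not(x-3 < 12 < x):
-- 			ans += f(x-3)
-- 		return ans
-- ===== SOURCE B (Python) =====
-- def f(x):
--     if x < 3:
--         return 0
--     a, b, c = 0, 0, 1  # f(i-3), f(i-2), f(i-1) for i about to be computed
--     for i in range(4, x + 1):
--         cur = 0 if i == 18 else c + (0 if i - 3 < 12 < i else a)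
--         a, b, c = b, c, cur
--     return c
-- ===== Notes on version B (the rewrite author's own statement) =====
-- stated objective: faster
-- what changed: Replaced the branching recursion on f(x-1) and f(x-3) with a single bottom-up pass that keeps only the last three values.
import Mathlib
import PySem

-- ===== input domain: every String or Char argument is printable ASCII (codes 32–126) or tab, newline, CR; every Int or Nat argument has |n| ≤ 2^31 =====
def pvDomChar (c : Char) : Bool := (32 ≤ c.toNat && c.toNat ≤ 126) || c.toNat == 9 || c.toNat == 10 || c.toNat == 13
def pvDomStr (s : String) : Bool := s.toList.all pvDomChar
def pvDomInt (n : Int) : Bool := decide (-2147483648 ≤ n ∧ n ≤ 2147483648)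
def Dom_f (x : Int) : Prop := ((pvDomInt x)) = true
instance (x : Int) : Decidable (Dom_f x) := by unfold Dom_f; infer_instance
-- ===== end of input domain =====

-- B replaces A's branching recursion on x-1 and x-3 (exponential) with a single
-- bottom-up pass keeping only the last three values (linear in x).

-- ===== PORT A =====
def f (x : Int) : Int :=
  if x < 3 then 0
  else if x = 3 then 1
  else if x = 18 then 0
  else
    let ans := f (x - 1)
    if ¬(x - 3 < 12 ∧ 12 < x) then ans + f (x - 3) else ans
termination_by x.toNat
decreasing_by all_goals omega

-- ===== PORT B =====
-- loop body: state (a,b,c) = (f(i-3), f(i-2), f(i-1)); compute f(i), shift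
def fStep (s : Int × Int × Int) (i : Int) : Int × Int × Int :=
  let cur : Int := if i = 18 then 0 else s.2.2 + (if i - 3 < 12 ∧ 12 < i then 0 else s.1)
  (s.2.1, s.2.2, cur)

def f_alt (x : Int) : Int :=
  if x < 3 then 0
  else ((PySem.List.pyRange 4 (x + 1) 1).foldl fStep (0, 0, 1)).2.2

-- ===== PRECONDITION & SPEC =====
-- Pre_ excludes large x, on which Python A's deep recursion on x-1/x-3 exhausts
-- the interpreter's stack and raises RecursionError (or never finishes); the bound
-- is a conservative margin below the default recursion limit.
def Pre_f (x : Int) : Prop := x ≤ 600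
instance (x : Int) : Decidable (Pre_f x) := by unfold Pre_f; infer_instance
def pvWitness_f : Int := (20)

def Spec_f (x : Int) (out : Int) : Prop := out = f_alt x
instance (x : Int) (out : Int) : Decidable (Spec_f x out) := by unfold Spec_f; infer_instance

-- ===== CLAIM (what is proved, stated in full; the proofs are below) =====
def Claim_equal_f : Prop := ∀ (x : Int), Dom_f x → Pre_f x → Spec_f x (f x)

-- ===== LEMMAS AND PROOFS =====

-- the loop invariant: after processing range(4, x+1) the state is (f(x-2), f(x-1), f(x))
theorem fLoop_inv (x : Int) (hx : 3 ≤ x) :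
    (PySem.List.pyRange 4 (x + 1) 1).foldl fStep (0, 0, 1)
      = (f (x - 2), f (x - 1), f x) := by
  induction x, hx using Int.le_induction with
  | base =>
      rw [PySem.List.pyRange_one_eq_nil (by omega)]
      simp only [List.foldl_nil]
      refine Prod.ext ?_ (Prod.ext ?_ ?_) <;> simp only
      · rw [show (3:Int) - 2 = 1 by ring, f]; norm_num
      · rw [show (3:Int) - 1 = 2 by ring, f]; norm_num
      · rw [f]; norm_num
  | succ n hn ih =>
      rw [show n + 1 + 1 = (n + 1) + 1 by ring,
          PySem.List.pyRange_one_succ_right (by omega),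
          List.foldl_append, ih]
      simp only [List.foldl_cons, List.foldl_nil, fStep]
      rw [show (n:Int) + 1 - 2 = n - 1 by ring, show (n:Int) + 1 - 1 = n by ring]
      refine Prod.ext rfl (Prod.ext rfl ?_)
      simp only
      conv_rhs => rw [f]
      have h1 : ¬ (n + 1 < 3) := by omega
      have h2 : ¬ (n + 1 = 3) := by omega
      rw [if_neg h1, if_neg h2]
      by_cases h18 : (n : Int) + 1 = 18
      · rw [if_pos h18, if_pos h18]
      · rw [if_neg h18, if_neg h18]
        by_cases hc : (n : Int) + 1 - 3 < 12 ∧ 12 < n + 1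
        · rw [if_pos hc, if_neg (by exact fun h => h hc)]
          rw [show (n : Int) + 1 - 1 = n by ring, add_zero]
        · rw [if_neg hc, if_pos hc]
          rw [show (n : Int) + 1 - 3 = n - 2 by ring, show (n : Int) + 1 - 1 = n by ring]

-- ===== VERDICT (by name: the statement is the Claim_ definition above) =====
theorem f_spec : Claim_equal_f := by
  intro x _ _
  unfold Spec_f f_alt
  by_cases hx : x < 3
  · rw [if_pos hx, f, if_pos hx]
  · rw [if_neg hx, fLoop_inv x (by omega)]
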